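-- pv_equiv track=rewrite | github.com/wuaipinglab/CovRecomb | CovRecomb-Global-Version/Simulation_Test/Simulator_analog/Compare_CoverageRate.py | del_indel
-- ===== SOURCE A (Python) =====
-- def del_indel(seq3, index_list, need_bar, raw_len):
--
--     select_n = []
--     del_count = 0
--     for n in range(len(seq3)):
--         if n in index_list and del_count < int(raw_len - need_bar):
--             del_count += 1
--             continue
--         else:
--             select_n.append(seq3[n])
--
--     return select_n
-- ===== SOURCE B (Python) =====
-- def del_indel(seq3, index_list, need_bar, raw_len):
--     limit = int(raw_len - need_bar)
--     idx = set(index_list)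
--     matches = [n for n in range(len(seq3)) if n in idx]
--     to_delete = set(matches[:max(limit, 0)])
--     return [seq3[n] for n in range(len(seq3)) if n not in to_delete]
-- ===== Notes on version B (the rewrite author's own statement) =====
-- stated objective: faster
-- what changed: Replaces the interleaved running-deletion-counter loop (with an O(len(index_list)) membership scan per position) by precomputing a hash set of indices and the set of the first max(limit,0) matching positions, then filtering in a separate pass with O(1) lookups.
import Mathlib
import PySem

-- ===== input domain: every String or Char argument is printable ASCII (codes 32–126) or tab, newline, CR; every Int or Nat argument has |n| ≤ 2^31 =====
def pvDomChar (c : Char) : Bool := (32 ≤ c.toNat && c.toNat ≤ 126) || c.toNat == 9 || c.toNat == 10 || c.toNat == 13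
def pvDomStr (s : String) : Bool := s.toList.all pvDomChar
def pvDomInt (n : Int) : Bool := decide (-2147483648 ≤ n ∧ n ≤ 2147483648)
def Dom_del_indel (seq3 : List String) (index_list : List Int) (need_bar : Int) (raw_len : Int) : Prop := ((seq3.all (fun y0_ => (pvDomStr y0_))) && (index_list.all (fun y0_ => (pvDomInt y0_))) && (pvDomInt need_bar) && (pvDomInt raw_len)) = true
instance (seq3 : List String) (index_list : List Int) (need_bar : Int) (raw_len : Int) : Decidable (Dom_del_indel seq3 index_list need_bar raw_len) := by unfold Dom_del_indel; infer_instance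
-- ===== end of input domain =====

-- B replaces A's interleaved running-deletion-counter loop by a precomputed delete-set plus a filter pass (objective: faster, asymptotic).

-- ===== PORT A =====
-- Literal transliteration of A: one loop over range(len(seq3)) carrying (select_n, del_count).
-- `int(raw_len - need_bar)` on ints is the identity; `seq3[n]` with n drawn from the range is
-- always in range, so `pyGetD … ""` is exact (the default is never used).
def del_indel (seq3 : List String) (index_list : List Int) (need_bar : Int) (raw_len : Int) : List String :=
  ((PySem.List.pyRange 0 (seq3.length : Int) 1).foldl
    (fun (st : List String × Int) n =>
      if n ∈ index_list ∧ st.2 < raw_len - need_bar then (st.1, st.2 + 1)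
      else (st.1 ++ [PySem.List.pyGetD seq3 n ""], st.2))
    ([], 0)).1

-- ===== PORT B =====
-- Literal transliteration of Source B: limit, idx = set(index_list), matches, to_delete, final filter.
-- As in A's port, the range index is always in range so `pyGetD … ""` is exact.
def del_indel_alt (seq3 : List String) (index_list : List Int) (need_bar : Int) (raw_len : Int) : List String :=
  let limit := raw_len - need_bar
  let idx : PySem.Set Int := PySem.Set.ofList index_list
  let matched := (PySem.List.pyRange 0 (seq3.length : Int) 1).filter (fun n => decide (n ∈ idx))
  let toDelete : PySem.Set Int := PySem.Set.ofList (matched.take (max limit 0).toNat)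
  ((PySem.List.pyRange 0 (seq3.length : Int) 1).filter (fun n => decide (n ∉ toDelete))).map
    (fun n => PySem.List.pyGetD seq3 n "")

-- ===== PRECONDITION & SPEC =====
def Spec_del_indel (seq3 : List String) (index_list : List Int) (need_bar : Int) (raw_len : Int) (out : List String) : Prop := out = del_indel_alt seq3 index_list need_bar raw_len
instance (seq3 : List String) (index_list : List Int) (need_bar : Int) (raw_len : Int) (out : List String) : Decidable (Spec_del_indel seq3 index_list need_bar raw_len out) := by unfold Spec_del_indel; infer_instance

-- ===== CLAIM (what is proved, stated in full; the proofs are below) =====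
def Claim_equal_del_indel : Prop := ∀ (seq3 : List String) (index_list : List Int) (need_bar : Int) (raw_len : Int), Dom_del_indel seq3 index_list need_bar raw_len → Spec_del_indel seq3 index_list need_bar raw_len (del_indel seq3 index_list need_bar raw_len)

-- ===== LEMMAS AND PROOFS =====

-- A's loop in structural-recursion form.
def loopA (seq3 : List String) (idx : List Int) (limit : Int) : List Int → Int → List String
  | [], _ => []
  | n :: L, c =>
    if n ∈ idx ∧ c < limit then loopA seq3 idx limit L (c + 1)
    else PySem.List.pyGetD seq3 n "" :: loopA seq3 idx limit L c

theorem foldl_eq_loopA (seq3 : List String) (idx : List Int) (limit : Int) :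
    ∀ (L : List Int) (acc : List String) (c : Int),
      (L.foldl
        (fun (st : List String × Int) n =>
          if n ∈ idx ∧ st.2 < limit then (st.1, st.2 + 1)
          else (st.1 ++ [PySem.List.pyGetD seq3 n ""], st.2))
        (acc, c)).1 = acc ++ loopA seq3 idx limit L c := by
  intro L
  induction L with
  | nil => intro acc c; simp [loopA]
  | cons n L ih =>
    intro acc c
    by_cases h : n ∈ idx ∧ c < limit
    · simp [loopA, h, ih]
    · simp [loopA, h, ih]

-- Main invariant: with remaining budget limit - c, A's loop keeps exactly the
-- positions not among the first (limit - c) matching ones.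
theorem loopA_eq_filter (seq3 : List String) (idx : List Int) (limit : Int) :
    ∀ (L : List Int) (c : Int), L.Nodup →
      loopA seq3 idx limit L c =
        ((L.filter (fun n =>
            decide (n ∉ (L.filter (fun m => decide (m ∈ idx))).take (limit - c).toNat))).map
          (fun n => PySem.List.pyGetD seq3 n "")) := by
  intro L
  induction L with
  | nil => intro c _; simp [loopA]
  | cons n L ih =>
    intro c hnd
    have hnL : n ∉ L := by simp [List.nodup_cons] at hnd; exact hnd.1
    have hndL : L.Nodup := by simp [List.nodup_cons] at hnd; exact hnd.2
    by_cases hP : n ∈ idx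
    · by_cases hc : c < limit
      · have hpos : (limit - c).toNat = (limit - (c + 1)).toNat + 1 := by omega
        have htake : ((n :: L).filter (fun m => decide (m ∈ idx))).take (limit - c).toNat
            = n :: (L.filter (fun m => decide (m ∈ idx))).take (limit - (c + 1)).toNat := by
          simp [hP, hpos]
        rw [show loopA seq3 idx limit (n :: L) c = loopA seq3 idx limit L (c + 1) from by
              simp [loopA, hP, hc],
            ih (c + 1) hndL]
        have hfeq : L.filter (fun m =>
              decide (m ∉ ((n :: L).filter (fun m => decide (m ∈ idx))).take (limit - c).toNat))
            = L.filter (fun m =>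
              decide (m ∉ (L.filter (fun m => decide (m ∈ idx))).take (limit - (c + 1)).toNat)) := by
          apply List.filter_congr
          intro m hm
          have hmn : m ≠ n := fun h => hnL (h ▸ hm)
          rw [htake]; simp [hmn]
        have hnin : n ∈ ((n :: L).filter (fun m => decide (m ∈ idx))).take (limit - c).toNat := by
          rw [htake]; exact List.mem_cons_self
        have hbig : (n :: L).filter (fun m =>
              decide (m ∉ ((n :: L).filter (fun m => decide (m ∈ idx))).take (limit - c).toNat))
            = L.filter (fun m =>
              decide (m ∉ ((n :: L).filter (fun m => decide (m ∈ idx))).take (limit - c).toNat)) := by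
          rw [List.filter_cons]
          simp [hnin]
        rw [hbig, hfeq]
      · have hz : (limit - c).toNat = 0 := by omega
        rw [show loopA seq3 idx limit (n :: L) c
              = PySem.List.pyGetD seq3 n "" :: loopA seq3 idx limit L c from by
              simp [loopA, hP, hc],
            ih c hndL]
        simp [hz, List.filter_cons]
    · rw [show loopA seq3 idx limit (n :: L) c
            = PySem.List.pyGetD seq3 n "" :: loopA seq3 idx limit L c from by
            simp [loopA, hP],
          ih c hndL]
      have hfilt : (n :: L).filter (fun m => decide (m ∈ idx))
          = L.filter (fun m => decide (m ∈ idx)) := by simp [hP]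
      have hnot : n ∉ (L.filter (fun m => decide (m ∈ idx))).take (limit - c).toNat := by
        intro h
        exact hP (by simpa using (List.mem_filter.1 (List.mem_of_mem_take h)).2)
      simp [hfilt, hnot]

-- ===== VERDICT (by name: the statement is the Claim_ definition above) =====
theorem del_indel_spec : Claim_equal_del_indel := by
  intro seq3 index_list need_bar raw_len _
  unfold Spec_del_indel del_indel
  rw [foldl_eq_loopA seq3 index_list (raw_len - need_bar) _ [] 0,
      loopA_eq_filter seq3 index_list (raw_len - need_bar) _ 0
        (PySem.List.nodup_pyRange_one 0 _)]
  have hmax : (max (raw_len - need_bar) 0).toNat = (raw_len - need_bar).toNat := by omega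
  simp [del_indel_alt, PySem.Set.mem_ofList, hmax]
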